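-- pv_equiv track=rewrite | github.com/ItsMysterix/Slurpy | backend/memory.py | _generate_semantic_tags
-- ===== SOURCE A (Python) =====
-- from typing import Dict, Any, List, Optional, Tuple, Union
--
-- def _generate_semantic_tags(text: str, emotion: str) -> List[str]:
--     """Generate semantic tags for better search"""
--     tags = [emotion]
--
--     text_lower = text.lower()
--
--     # Topic tags
--     if any(word in text_lower for word in ["work", "job", "career", "boss"]):
--         tags.append("work")
--     if any(word in text_lower for word in ["family", "parent", "mom", "dad", "sibling"]):
--         tags.append("family")
--     if any(word in text_lower for word in ["friend", "relationship", "partner", "dating"]):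
--         tags.append("relationships")
--     if any(word in text_lower for word in ["school", "study", "exam", "class"]):
--         tags.append("education")
--     if any(word in text_lower for word in ["health", "doctor", "medicine", "sick"]):
--         tags.append("health")
--     if any(word in text_lower for word in ["money", "budget", "expensive", "debt"]):
--         tags.append("finances")
--
--     # Emotional intensity tags
--     if any(word in text_lower for word in ["really", "very", "extremely", "so much"]):
--         tags.append("high_intensity")
--
--     # Progress tags
--     if any(word in text_lower for word in ["better", "improving", "progress", "good"]):
--         tags.append("positive_progress")
--     if any(word in text_lower for word in ["worse", "harder", "difficult", "struggling"]):
--         tags.append("challenging")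
--
--     return list(set(tags))  # Remove duplicates
-- ===== SOURCE B (Python) =====
-- # Single left-to-right scan over the text: at each position, prefix-match the
-- # keywords (keyword -> tag pairs) instead of running one substring search per keyword.
-- _KEYWORD_TAGS = [
--     ("work", "work"), ("job", "work"), ("career", "work"), ("boss", "work"),
--     ("family", "family"), ("parent", "family"), ("mom", "family"), ("dad", "family"), ("sibling", "family"),
--     ("friend", "relationships"), ("relationship", "relationships"), ("partner", "relationships"), ("dating", "relationships"),
--     ("school", "education"), ("study", "education"), ("exam", "education"), ("class", "education"),
--     ("health", "health"), ("doctor", "health"), ("medicine", "health"), ("sick", "health"),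
--     ("money", "finances"), ("budget", "finances"), ("expensive", "finances"), ("debt", "finances"),
--     ("really", "high_intensity"), ("very", "high_intensity"), ("extremely", "high_intensity"), ("so much", "high_intensity"),
--     ("better", "positive_progress"), ("improving", "positive_progress"), ("progress", "positive_progress"), ("good", "positive_progress"),
--     ("worse", "challenging"), ("harder", "challenging"), ("difficult", "challenging"), ("struggling", "challenging"),
-- ]
--
-- _TAG_ORDER = ["work", "family", "relationships", "education", "health", "finances",
--               "high_intensity", "positive_progress", "challenging"]
--
--
-- def _generate_semantic_tags(text: str, emotion: str):
--     """Generate semantic tags via one positional scan with prefix matching."""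
--     low = text.lower()
--     hit = set()
--     for i in range(len(low)):
--         for kw, tag in _KEYWORD_TAGS:
--             if low[i:i + len(kw)] == kw:
--                 hit.add(tag)
--     return list(set([emotion] + [t for t in _TAG_ORDER if t in hit]))
-- ===== Notes on version B (the rewrite author's own statement) =====
-- stated objective: alternative
-- what changed: Replaces A's nine per-group substring searches ('kw in text') with a single left-to-right positional scan of the text that prefix-matches a keyword->tag table at each index, accumulating hit tags in a set; the output list is then assembled from the hit set.
import Mathlib
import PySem

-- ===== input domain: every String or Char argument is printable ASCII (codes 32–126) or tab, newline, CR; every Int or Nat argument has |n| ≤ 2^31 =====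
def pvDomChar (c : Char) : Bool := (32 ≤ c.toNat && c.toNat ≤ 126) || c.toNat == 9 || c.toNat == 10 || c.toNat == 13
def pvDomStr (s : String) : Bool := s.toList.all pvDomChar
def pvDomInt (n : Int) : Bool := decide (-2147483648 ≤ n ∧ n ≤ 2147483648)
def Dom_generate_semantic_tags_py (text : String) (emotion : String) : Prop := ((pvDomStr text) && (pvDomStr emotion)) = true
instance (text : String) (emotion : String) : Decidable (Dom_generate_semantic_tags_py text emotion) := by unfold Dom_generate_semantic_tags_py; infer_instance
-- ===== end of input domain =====

-- B replaces A's nine per-keyword-group substring searches by one left-to-right positional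
-- scan of the text that prefix-matches a keyword→tag table at each index (objective: alternative).

-- ===== PORT A =====
def generate_semantic_tags_py (text : String) (emotion : String) : List String :=
  let tags := [emotion]
  let text_lower := PySem.Str.lower text
  let tags := if (["work", "job", "career", "boss"].any fun word => PySem.Str.isIn word text_lower) then tags ++ ["work"] else tags
  let tags := if (["family", "parent", "mom", "dad", "sibling"].any fun word => PySem.Str.isIn word text_lower) then tags ++ ["family"] else tags
  let tags := if (["friend", "relationship", "partner", "dating"].any fun word => PySem.Str.isIn word text_lower) then tags ++ ["relationships"] else tags
  let tags := if (["school", "study", "exam", "class"].any fun word => PySem.Str.isIn word text_lower) then tags ++ ["education"] else tags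
  let tags := if (["health", "doctor", "medicine", "sick"].any fun word => PySem.Str.isIn word text_lower) then tags ++ ["health"] else tags
  let tags := if (["money", "budget", "expensive", "debt"].any fun word => PySem.Str.isIn word text_lower) then tags ++ ["finances"] else tags
  let tags := if (["really", "very", "extremely", "so much"].any fun word => PySem.Str.isIn word text_lower) then tags ++ ["high_intensity"] else tags
  let tags := if (["better", "improving", "progress", "good"].any fun word => PySem.Str.isIn word text_lower) then tags ++ ["positive_progress"] else tags
  let tags := if (["worse", "harder", "difficult", "struggling"].any fun word => PySem.Str.isIn word text_lower) then tags ++ ["challenging"] else tags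
  PySem.Set.ofList tags

-- ===== PORT B =====
-- _KEYWORD_TAGS (keywords as their code-point lists, matching Source B's slicing of the lowered text)
def pvKeywordTags : List (List Char × String) :=
  [ ("work".toList, "work"), ("job".toList, "work"), ("career".toList, "work"), ("boss".toList, "work"),
    ("family".toList, "family"), ("parent".toList, "family"), ("mom".toList, "family"), ("dad".toList, "family"), ("sibling".toList, "family"),
    ("friend".toList, "relationships"), ("relationship".toList, "relationships"), ("partner".toList, "relationships"), ("dating".toList, "relationships"),
    ("school".toList, "education"), ("study".toList, "education"), ("exam".toList, "education"), ("class".toList, "education"),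
    ("health".toList, "health"), ("doctor".toList, "health"), ("medicine".toList, "health"), ("sick".toList, "health"),
    ("money".toList, "finances"), ("budget".toList, "finances"), ("expensive".toList, "finances"), ("debt".toList, "finances"),
    ("really".toList, "high_intensity"), ("very".toList, "high_intensity"), ("extremely".toList, "high_intensity"), ("so much".toList, "high_intensity"),
    ("better".toList, "positive_progress"), ("improving".toList, "positive_progress"), ("progress".toList, "positive_progress"), ("good".toList, "positive_progress"),
    ("worse".toList, "challenging"), ("harder".toList, "challenging"), ("difficult".toList, "challenging"), ("struggling".toList, "challenging") ]

def pvTagOrder : List String :=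
  ["work", "family", "relationships", "education", "health", "finances",
   "high_intensity", "positive_progress", "challenging"]

def generate_semantic_tags_py_alt (text : String) (emotion : String) : List String :=
  let low := (PySem.Str.lower text).toList
  let hit : PySem.Set String :=
    (PySem.List.pyRange 0 (low.length : Int) 1).foldl (fun h i =>
      pvKeywordTags.foldl (fun h kt =>
        if PySem.List.slice low (some i) (some (i + (kt.1.length : Int))) == kt.1
        then PySem.Set.add h kt.2 else h) h)
      PySem.Set.empty
  PySem.Set.ofList (emotion :: pvTagOrder.filter (fun t => t ∈ hit))

-- ===== PRECONDITION & SPEC =====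
def Spec_generate_semantic_tags_py (text : String) (emotion : String) (out : List String) : Prop := out = generate_semantic_tags_py_alt text emotion
instance (text : String) (emotion : String) (out : List String) : Decidable (Spec_generate_semantic_tags_py text emotion out) := by unfold Spec_generate_semantic_tags_py; infer_instance

-- ===== CLAIM (what is proved, stated in full; the proofs are below) =====
def Claim_equal_generate_semantic_tags_py : Prop := ∀ (text : String) (emotion : String), Dom_generate_semantic_tags_py text emotion → Spec_generate_semantic_tags_py text emotion (generate_semantic_tags_py text emotion)

-- ===== LEMMAS AND PROOFS =====

-- membership in a fold that conditionally adds to a Set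
theorem mem_foldl_cond_add {γ : Type} (l : List γ) (p : γ → Bool) (g : γ → String)
    (s : PySem.Set String) (x : String) :
    (x ∈ l.foldl (fun h a => if p a then PySem.Set.add h (g a) else h) s) ↔
      x ∈ s ∨ ∃ a ∈ l, p a = true ∧ g a = x := by
  induction l generalizing s with
  | nil => simp
  | cons a l ih =>
    simp only [List.foldl_cons, ih, List.mem_cons]
    by_cases hp : p a = true <;> · simp [hp, PySem.Set.mem_add]; try tauto

-- membership in the nested scan fold
theorem mem_foldl_nested (is : List Int) (q : Int → (List Char × String) → Bool)
    (s : PySem.Set String) (x : String) :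
    (x ∈ is.foldl (fun h i =>
        pvKeywordTags.foldl (fun h kt => if q i kt then PySem.Set.add h kt.2 else h) h) s) ↔
      x ∈ s ∨ ∃ i ∈ is, ∃ kt ∈ pvKeywordTags, q i kt = true ∧ kt.2 = x := by
  induction is generalizing s with
  | nil => simp
  | cons i is ih =>
    simp only [List.foldl_cons, ih, List.mem_cons,
      mem_foldl_cond_add pvKeywordTags (q i) Prod.snd s x]
    simp only [or_and_right, exists_or, exists_eq_left]
    exact or_assoc

-- positional prefix matching finds a keyword iff it occurs as a substring
theorem exists_slice_eq_iff (low kw : List Char) (hkw : kw ≠ []) :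
    (∃ i ∈ PySem.List.pyRange 0 (low.length : Int) 1,
        PySem.List.slice low (some i) (some (i + (kw.length : Int))) = kw) ↔
      PySem.Chars.isIn kw low = true := by
  rw [← PySem.Chars.exists_prefix_drop_iff_isIn]
  constructor
  · rintro ⟨i, hi, hslice⟩
    rw [PySem.List.mem_pyRange_one] at hi
    obtain ⟨j, rfl⟩ : ∃ j : Nat, i = (j : Int) := ⟨i.toNat, (Int.toNat_of_nonneg hi.1).symm⟩
    refine ⟨j, ?_⟩
    rw [PySem.List.slice_natCast_add] at hslice
    rw [List.prefix_iff_eq_take]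
    exact hslice.symm
  · rintro ⟨j, hpre⟩
    have hj : j < low.length := by
      by_contra hge
      rw [List.drop_eq_nil_of_le (by omega)] at hpre
      exact hkw (List.prefix_nil.mp hpre)
    refine ⟨(j : Int), ?_, ?_⟩
    · rw [PySem.List.mem_pyRange_one]
      constructor
      · exact Int.natCast_nonneg j
      · exact_mod_cast hj
    · rw [PySem.List.slice_natCast_add]
      rw [List.prefix_iff_eq_take] at hpre
      exact hpre.symm

-- characterization of the hit set built by port B's scan
theorem mem_hit_iff (low : List Char) (x : String) :
    (x ∈ (PySem.List.pyRange 0 (low.length : Int) 1).foldl (fun h i =>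
        pvKeywordTags.foldl (fun h kt =>
          if PySem.List.slice low (some i) (some (i + (kt.1.length : Int))) == kt.1
          then PySem.Set.add h kt.2 else h) h)
        PySem.Set.empty) ↔
      ∃ kt ∈ pvKeywordTags, kt.2 = x ∧ PySem.Chars.isIn kt.1 low = true := by
  rw [mem_foldl_nested _ (fun i kt =>
    PySem.List.slice low (some i) (some (i + (kt.1.length : Int))) == kt.1)]
  have hne : ∀ kt ∈ pvKeywordTags, kt.1 ≠ [] := by decide
  constructor
  · rintro (h | ⟨i, hi, kt, hkt, hq, hx⟩)
    · simp [PySem.Set.empty] at h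
    · refine ⟨kt, hkt, hx, ?_⟩
      rw [← exists_slice_eq_iff low kt.1 (hne kt hkt)]
      exact ⟨i, hi, by simpa using hq⟩
  · rintro ⟨kt, hkt, hx, hin⟩
    right
    rw [← exists_slice_eq_iff low kt.1 (hne kt hkt)] at hin
    obtain ⟨i, hi, hs⟩ := hin
    exact ⟨i, hi, kt, hkt, by simpa using hs, hx⟩

-- ===== VERDICT (by name: the statement is the Claim_ definition above) =====
theorem generate_semantic_tags_py_spec : Claim_equal_generate_semantic_tags_py := by
  intro text emotion _
  unfold Spec_generate_semantic_tags_py generate_semantic_tags_py generate_semantic_tags_py_alt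
  simp only [mem_hit_iff, pvTagOrder, List.filter]
  have h1 : decide (∃ kt ∈ pvKeywordTags, kt.2 = "work" ∧ PySem.Chars.isIn kt.1 (PySem.Str.lower text).toList = true)
      = (["work", "job", "career", "boss"].any fun word => PySem.Str.isIn word (PySem.Str.lower text)) := by
    rw [Bool.eq_iff_iff]
    simp [pvKeywordTags]
    try tauto
  have h2 : decide (∃ kt ∈ pvKeywordTags, kt.2 = "family" ∧ PySem.Chars.isIn kt.1 (PySem.Str.lower text).toList = true)
      = (["family", "parent", "mom", "dad", "sibling"].any fun word => PySem.Str.isIn word (PySem.Str.lower text)) := by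
    rw [Bool.eq_iff_iff]
    simp [pvKeywordTags]
    try tauto
  have h3 : decide (∃ kt ∈ pvKeywordTags, kt.2 = "relationships" ∧ PySem.Chars.isIn kt.1 (PySem.Str.lower text).toList = true)
      = (["friend", "relationship", "partner", "dating"].any fun word => PySem.Str.isIn word (PySem.Str.lower text)) := by
    rw [Bool.eq_iff_iff]
    simp [pvKeywordTags]
    try tauto
  have h4 : decide (∃ kt ∈ pvKeywordTags, kt.2 = "education" ∧ PySem.Chars.isIn kt.1 (PySem.Str.lower text).toList = true)
      = (["school", "study", "exam", "class"].any fun word => PySem.Str.isIn word (PySem.Str.lower text)) := by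
    rw [Bool.eq_iff_iff]
    simp [pvKeywordTags]
    try tauto
  have h5 : decide (∃ kt ∈ pvKeywordTags, kt.2 = "health" ∧ PySem.Chars.isIn kt.1 (PySem.Str.lower text).toList = true)
      = (["health", "doctor", "medicine", "sick"].any fun word => PySem.Str.isIn word (PySem.Str.lower text)) := by
    rw [Bool.eq_iff_iff]
    simp [pvKeywordTags]
    try tauto
  have h6 : decide (∃ kt ∈ pvKeywordTags, kt.2 = "finances" ∧ PySem.Chars.isIn kt.1 (PySem.Str.lower text).toList = true)
      = (["money", "budget", "expensive", "debt"].any fun word => PySem.Str.isIn word (PySem.Str.lower text)) := by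
    rw [Bool.eq_iff_iff]
    simp [pvKeywordTags]
    try tauto
  have h7 : decide (∃ kt ∈ pvKeywordTags, kt.2 = "high_intensity" ∧ PySem.Chars.isIn kt.1 (PySem.Str.lower text).toList = true)
      = (["really", "very", "extremely", "so much"].any fun word => PySem.Str.isIn word (PySem.Str.lower text)) := by
    rw [Bool.eq_iff_iff]
    simp [pvKeywordTags]
    try tauto
  have h8 : decide (∃ kt ∈ pvKeywordTags, kt.2 = "positive_progress" ∧ PySem.Chars.isIn kt.1 (PySem.Str.lower text).toList = true)
      = (["better", "improving", "progress", "good"].any fun word => PySem.Str.isIn word (PySem.Str.lower text)) := by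
    rw [Bool.eq_iff_iff]
    simp [pvKeywordTags]
    try tauto
  have h9 : decide (∃ kt ∈ pvKeywordTags, kt.2 = "challenging" ∧ PySem.Chars.isIn kt.1 (PySem.Str.lower text).toList = true)
      = (["worse", "harder", "difficult", "struggling"].any fun word => PySem.Str.isIn word (PySem.Str.lower text)) := by
    rw [Bool.eq_iff_iff]
    simp [pvKeywordTags]
    try tauto
  rw [h1, h2, h3, h4, h5, h6, h7, h8, h9]
  generalize (["work", "job", "career", "boss"].any fun word => PySem.Str.isIn word (PySem.Str.lower text)) = b1 at *
  generalize (["family", "parent", "mom", "dad", "sibling"].any fun word => PySem.Str.isIn word (PySem.Str.lower text)) = b2 at *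
  generalize (["friend", "relationship", "partner", "dating"].any fun word => PySem.Str.isIn word (PySem.Str.lower text)) = b3 at *
  generalize (["school", "study", "exam", "class"].any fun word => PySem.Str.isIn word (PySem.Str.lower text)) = b4 at *
  generalize (["health", "doctor", "medicine", "sick"].any fun word => PySem.Str.isIn word (PySem.Str.lower text)) = b5 at *
  generalize (["money", "budget", "expensive", "debt"].any fun word => PySem.Str.isIn word (PySem.Str.lower text)) = b6 at *
  generalize (["really", "very", "extremely", "so much"].any fun word => PySem.Str.isIn word (PySem.Str.lower text)) = b7 at *
  generalize (["better", "improving", "progress", "good"].any fun word => PySem.Str.isIn word (PySem.Str.lower text)) = b8 at *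
  generalize (["worse", "harder", "difficult", "struggling"].any fun word => PySem.Str.isIn word (PySem.Str.lower text)) = b9 at *
  cases b1 <;> cases b2 <;> cases b3 <;> cases b4 <;> cases b5 <;> cases b6 <;> cases b7 <;> cases b8 <;> cases b9 <;> rfl
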